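-- pv_equiv track=rewrite | github.com/tarunyadav/WARP-MILP | MILP_Solve.py | strtoint2
-- ===== SOURCE A (Python) =====
-- def strtoint2(s):
--     reg = 0
--     s1 = ''
--     s2 = ''
--     result = []
--     for i in range(0,len(s)):
--         if s[i] == '_':
--             reg = 1
--         if s[i] >= '0' and s[i]<= '9':
--             if reg == 0:
--                 s1 = s1 + s[i]
--             if reg == 1:
--                 s2 = s2 + s[i]
--     result.append(int(s2))
--     return result
-- ===== SOURCE B (Python) =====
-- def strtoint2(s):
--     pos = s.find('_')
--     digits = ''
--     for j in range(len(s) - 1, pos, -1):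
--         c = s[j]
--         if '0' <= c <= '9':
--             digits = c + digits
--     return [int(digits)]
-- ===== Notes on version B (the rewrite author's own statement) =====
-- stated objective: alternative
-- what changed: Replaces A's forward scan with a latching reg flag building two strings with a boundary-first strategy: locate the first underscore with s.find, then walk the indices from the end of the string DOWN to that boundary, prepending each ASCII digit, so the digit string is built back-to-front and the discarded prefix string s1 is never computed. Pre_ excludes exactly the inputs with no ASCII digit after the first underscore (or no underscore at all), where A's int('') raises ValueError.
-- outside the precondition, e.g. on strtoint2(''): A raises ValueError, B raises ValueError
import Mathlib
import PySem

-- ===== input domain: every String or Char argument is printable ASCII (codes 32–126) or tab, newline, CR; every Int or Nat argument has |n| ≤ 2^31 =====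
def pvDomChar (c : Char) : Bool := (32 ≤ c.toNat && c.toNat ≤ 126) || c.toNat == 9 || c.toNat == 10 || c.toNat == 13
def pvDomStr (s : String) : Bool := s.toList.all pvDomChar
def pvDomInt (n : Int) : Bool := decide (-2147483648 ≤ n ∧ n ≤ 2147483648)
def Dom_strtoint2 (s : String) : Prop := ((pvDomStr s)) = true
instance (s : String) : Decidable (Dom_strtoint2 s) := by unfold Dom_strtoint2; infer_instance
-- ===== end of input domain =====

-- B locates the first underscore with find, then walks the string from the END down to that
-- boundary, prepending digits (back-to-front construction); A's forward latching-flag scan and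
-- its discarded prefix string s1 disappear. Alternative decomposition, same cost.


-- ===== PORT A =====
-- A's for-loop over s with state (reg, s1, s2); reg latches to 1 at the first '_',
-- digits go to s1 before it and to s2 after it, exactly as the two ifs in A.
def strtoint2Loop : List Char → Nat × List Char × List Char → Nat × List Char × List Char
  | [], st => st
  | c :: rest, (reg, s1, s2) =>
    let reg' := if c = '_' then 1 else reg
    let s1' := if ('0' ≤ c ∧ c ≤ '9') ∧ reg' = 0 then s1 ++ [c] else s1
    let s2' := if ('0' ≤ c ∧ c ≤ '9') ∧ reg' = 1 then s2 ++ [c] else s2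
    strtoint2Loop rest (reg', s1', s2')

def strtoint2 (s : String) : List Int :=
  let st := strtoint2Loop s.toList (0, [], [])
  -- int(s2): PySem.Int.ofChars?; none = ValueError, excluded by Pre_
  [(PySem.Int.ofChars? st.2.2).getD 0]

-- ===== PORT B =====
-- pos = s.find('_'); then for j in range(len(s)-1, pos, -1): prepend s[j] if it is a digit.
def strtoint2_alt (s : String) : List Int :=
  let l := s.toList
  let pos := PySem.Str.find s "_"
  let digits := (PySem.List.pyRange ((l.length : Int) - 1) pos (-1)).foldl
    (fun acc j =>
      let c := PySem.List.pyGetD l j ' '   -- s[j]; j is always in range (len-1 ≥ j > pos ≥ -1)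
      if ('0' ≤ c ∧ c ≤ '9') then c :: acc else acc) ([] : List Char)
  -- int(digits): PySem.Int.ofChars?; none = ValueError, excluded by Pre_
  [(PySem.Int.ofChars? digits).getD 0]

-- ===== PRECONDITION & SPEC =====
-- Pre_ excludes exactly the inputs with no ASCII digit after the first underscore
-- (in particular, no underscore at all): there int('') raises ValueError in A.
def Pre_strtoint2 (s : String) : Prop :=
  ((s.toList.dropWhile (· ≠ '_')).drop 1).any (fun c => decide ('0' ≤ c ∧ c ≤ '9')) = true
instance (s : String) : Decidable (Pre_strtoint2 s) := by unfold Pre_strtoint2; infer_instance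
def pvWitness_strtoint2 : String := "x_1a2"

def Spec_strtoint2 (s : String) (out : List Int) : Prop := out = strtoint2_alt s
instance (s : String) (out : List Int) : Decidable (Spec_strtoint2 s out) := by unfold Spec_strtoint2; infer_instance

-- ===== CLAIM (what is proved, stated in full; the proofs are below) =====
def Claim_equal_strtoint2 : Prop := ∀ (s : String), Dom_strtoint2 s → Pre_strtoint2 s → Spec_strtoint2 s (strtoint2 s)

-- ===== LEMMAS AND PROOFS =====
-- The characters after the first '_' (proof-side helper; neither port uses it).
def pvAfter : List Char → List Char
  | [] => []
  | c :: rest => if c = '_' then rest else pvAfter rest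

-- Once reg = 1, every digit of the remaining input is appended to s2.
theorem strtoint2Loop_one (l : List Char) : ∀ s1 s2 : List Char,
    (strtoint2Loop l (1, s1, s2)).2.2 = s2 ++ l.filter (fun c => decide ('0' ≤ c ∧ c ≤ '9')) := by
  induction l with
  | nil => simp [strtoint2Loop]
  | cons c rest ih =>
    intro s1 s2
    by_cases hu : c = '_'
    · subst hu; simpa [strtoint2Loop, List.filter] using ih _ _
    · by_cases hd : ('0' ≤ c ∧ c ≤ '9')
      · simp [strtoint2Loop, hu, hd, List.filter, ih]
      · simp [strtoint2Loop, hu, hd, List.filter, ih]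

-- From reg = 0, s2 ends up with exactly the digits after the first '_'.
theorem strtoint2Loop_zero (l : List Char) : ∀ s1 s2 : List Char,
    (strtoint2Loop l (0, s1, s2)).2.2
      = s2 ++ (pvAfter l).filter (fun c => decide ('0' ≤ c ∧ c ≤ '9')) := by
  induction l with
  | nil => simp [strtoint2Loop, pvAfter]
  | cons c rest ih =>
    intro s1 s2
    by_cases hu : c = '_'
    · subst hu
      simpa [strtoint2Loop, pvAfter] using strtoint2Loop_one rest _ _
    · by_cases hd : ('0' ≤ c ∧ c ≤ '9')
      · simp [strtoint2Loop, hu, hd, pvAfter, ih]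
      · simp [strtoint2Loop, hu, hd, pvAfter, ih]

-- If position k holds the FIRST '_' of l, then pvAfter l is the suffix from k+1.
theorem pvAfter_eq_drop (l : List Char) : ∀ k : Nat,
    (∀ i < k, ¬ ['_'] <+: l.drop i) → ['_'] <+: l.drop k → pvAfter l = l.drop (k + 1) := by
  induction l with
  | nil => intro k _ hk; simp at hk
  | cons c rest ih =>
    intro k hmin hk
    cases k with
    | zero =>
      simp only [List.drop_zero] at hk
      rcases hk with ⟨t, ht⟩
      cases ht
      simp [pvAfter]
    | succ k =>
      have hc : c ≠ '_' := by
        intro h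
        exact hmin 0 (Nat.succ_pos _) ⟨rest, by simp [h]⟩
      have hmin' : ∀ i < k, ¬ ['_'] <+: rest.drop i := fun i hi =>
        hmin (i + 1) (by omega)
      simp only [List.drop_succ_cons] at hk ⊢
      simp [pvAfter, hc, ih k hmin' hk]

-- foldr with a prepend-if step is filter ∘ map.
theorem foldr_prepend_filter {α β : Type} (g : α → β) (p : β → Bool) :
    ∀ xs : List α,
      xs.foldr (fun j acc => if p (g j) then g j :: acc else acc) [] = (xs.map g).filter p := by
  intro xs
  induction xs with
  | nil => rfl
  | cons x t ih =>
    by_cases h : p (g x) = true <;> simp [h, ih]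

-- B's descending loop collects exactly the digits after index pos, in order.
theorem alt_digits_eq (l : List Char) (pos : Int) (hpos : 0 ≤ pos) :
    (PySem.List.pyRange ((l.length : Int) - 1) pos (-1)).foldl
      (fun acc j =>
        let c := PySem.List.pyGetD l j ' '
        if ('0' ≤ c ∧ c ≤ '9') then c :: acc else acc) ([] : List Char)
      = (l.drop (pos.toNat + 1)).filter (fun c => decide ('0' ≤ c ∧ c ≤ '9')) := by
  rw [PySem.List.pyRange_neg_one_eq_reverse]
  have h1 : ((l.length : Int) - 1) + 1 = (l.length : Int) := by ring
  rw [h1, List.foldl_reverse]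
  have hmain := foldr_prepend_filter (fun j => PySem.List.pyGetD l j ' ')
    (fun c => decide ('0' ≤ c ∧ c ≤ '9')) (PySem.List.pyRange (pos + 1) ((l.length : Int)))
  rw [PySem.List.map_pyGetD_pyRange' l ' ' (by omega : (0:Int) ≤ pos + 1)] at hmain
  have h2 : (pos + 1).toNat = pos.toNat + 1 := by omega
  rw [h2] at hmain
  simpa using hmain

-- ===== VERDICT (by name: the statement is the Claim_ definition above) =====
theorem strtoint2_spec : Claim_equal_strtoint2 := by
  intro s _ hpre
  unfold Spec_strtoint2 strtoint2 strtoint2_alt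
  -- Pre_ gives an underscore in s, hence find ≥ 0
  have hmem : '_' ∈ s.toList := by
    unfold Pre_strtoint2 at hpre
    by_contra hnot
    have : s.toList.dropWhile (· ≠ '_') = [] :=
      List.dropWhile_eq_nil_iff.mpr (fun x hx => by
        simp only [decide_eq_true_eq]
        intro h; exact hnot (h ▸ hx))
    rw [this] at hpre
    simp at hpre
  have hfind : PySem.Str.find s "_" = PySem.Chars.find s.toList ['_'] := rfl
  set pos := PySem.Chars.find s.toList ['_'] with hposdef
  have hpos : 0 ≤ pos := (PySem.Chars.find_nonneg_iff _ _).mpr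
    ((List.singleton_infix_iff _ _).mpr hmem)
  obtain ⟨hpre1, hmin⟩ := PySem.Chars.find_spec (s := s.toList) (sub := ['_']) hpos
  have hafter : pvAfter s.toList = s.toList.drop (pos.toNat + 1) :=
    pvAfter_eq_drop s.toList pos.toNat
      (fun i hi => hmin i hi) hpre1
  simp only [hfind]
  rw [alt_digits_eq s.toList pos hpos, strtoint2Loop_zero, hafter]
  simp
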